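-- pv_equiv track=rewrite | github.com/ilxijwd/coding-algorithms | convolutional.py | convolutional_code
-- ===== SOURCE A (Python) =====
-- def convolutional_code(top_conn, bottom_conn, binary_message):
--     coded_message = ''
--     registers = [0] * len(top_conn)
--
--     for bit in binary_message:
--         # Сдвинуть элементы регистров, поместить следующий на позицию 1
--         registers.pop()
--         registers.insert(0, bit)
--
--         top_bit = 0
--         bottom_bit = 0
--         for bit_in_register, top_has_connection, bottom_has_connection in zip(registers, top_conn, bottom_conn):
--             if top_has_connection:
--                 top_bit ^= bit_in_register
--             if bottom_has_connection:
--                 bottom_bit ^= bit_in_register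
--
--         coded_message += f'{top_bit}{bottom_bit}'
--
--     return coded_message
-- ===== SOURCE B (Python) =====
-- def convolutional_code(top_conn, bottom_conn, binary_message):
--     L = min(len(top_conn), len(bottom_conn))
--     top_taps = [j for j in range(L) if top_conn[j]]
--     bottom_taps = [j for j in range(L) if bottom_conn[j]]
--     out = []
--     for i in range(len(binary_message)):
--         t = 0
--         for j in top_taps:
--             if i - j >= 0:
--                 t ^= binary_message[i - j]
--         b = 0
--         for j in bottom_taps:
--             if i - j >= 0:
--                 b ^= binary_message[i - j]
--         out.append(f'{t}{b}')
--     return ''.join(out)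
-- ===== Notes on version B (the rewrite author's own statement) =====
-- stated objective: alternative
-- what changed: Replaces the per-bit shift register (pop/insert on a mutable list each step) with precomputed tap-index lists and direct backward indexing into the message, collecting output chunks and joining once at the end; same asymptotic cost, different data traversal.
import Mathlib
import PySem

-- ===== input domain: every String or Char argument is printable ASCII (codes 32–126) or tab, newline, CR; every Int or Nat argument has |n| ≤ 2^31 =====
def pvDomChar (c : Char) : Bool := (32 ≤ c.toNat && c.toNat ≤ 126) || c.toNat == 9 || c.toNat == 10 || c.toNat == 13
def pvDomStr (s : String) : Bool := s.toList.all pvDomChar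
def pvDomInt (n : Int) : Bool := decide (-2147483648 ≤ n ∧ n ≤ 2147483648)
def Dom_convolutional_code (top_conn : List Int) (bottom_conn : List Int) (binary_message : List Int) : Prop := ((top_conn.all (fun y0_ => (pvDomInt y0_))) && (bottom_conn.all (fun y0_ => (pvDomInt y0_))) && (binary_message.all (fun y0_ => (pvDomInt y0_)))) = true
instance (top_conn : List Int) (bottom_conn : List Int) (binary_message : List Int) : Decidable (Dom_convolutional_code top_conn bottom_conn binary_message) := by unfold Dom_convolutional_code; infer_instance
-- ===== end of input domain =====

-- B replaces A's per-bit shift register with precomputed tap-index lists, direct backward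
-- indexing into the message, and a single final join (objective: alternative).

-- ===== PORT A =====
def convolutional_code (top_conn : List Int) (bottom_conn : List Int) (binary_message : List Int) : String :=
  (binary_message.foldl (fun (st : String × List Int) bit =>
      let registers :=
        match PySem.List.pop? st.2 with
        | some pr => PySem.List.insert pr.2 0 bit
        | none => st.2    -- Python raises IndexError here (pop from empty list); excluded by Pre_
      let tb := (registers.zip (top_conn.zip bottom_conn)).foldl
        (fun (p : Int × Int) trip =>
          let p1 := if trip.2.1 ≠ 0 then (PySem.Int.bxor p.1 trip.1, p.2) else p
          if trip.2.2 ≠ 0 then (p1.1, PySem.Int.bxor p1.2 trip.1) else p1)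
        (0, 0)
      (st.1 ++ (PySem.Int.toStr tb.1 ++ PySem.Int.toStr tb.2), registers))
    ("", List.replicate top_conn.length 0)).1

-- ===== PORT B =====
-- inner loop of B: XOR of msg[i-j] over the taps j with i - j >= 0
def pvTapFold (taps : List Nat) (msg : List Int) (i : Nat) : Int :=
  taps.foldl (fun a j => if j ≤ i then PySem.Int.bxor a (msg.getD (i - j) 0) else a) 0

def convolutional_code_alt (top_conn : List Int) (bottom_conn : List Int) (binary_message : List Int) : String :=
  let L := min top_conn.length bottom_conn.length
  let top_taps := (List.range L).filter (fun j => top_conn.getD j 0 ≠ 0)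
  let bottom_taps := (List.range L).filter (fun j => bottom_conn.getD j 0 ≠ 0)
  PySem.Str.join "" ((List.range binary_message.length).map (fun i =>
    PySem.Int.toStr (pvTapFold top_taps binary_message i) ++
    PySem.Int.toStr (pvTapFold bottom_taps binary_message i)))

-- ===== PRECONDITION & SPEC =====
-- Pre_ excludes only the inputs where A raises IndexError: empty top_conn with a non-empty message.
def Pre_convolutional_code (top_conn : List Int) (bottom_conn : List Int) (binary_message : List Int) : Prop :=
  binary_message = [] ∨ top_conn ≠ []
instance (top_conn : List Int) (bottom_conn : List Int) (binary_message : List Int) : Decidable (Pre_convolutional_code top_conn bottom_conn binary_message) := by unfold Pre_convolutional_code; infer_instance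

def pvWitness_convolutional_code : List Int × List Int × List Int := ([1, 0, 1], [1, 1, 1], [1, 0, 1, 1])

def Spec_convolutional_code (top_conn : List Int) (bottom_conn : List Int) (binary_message : List Int) (out : String) : Prop := out = convolutional_code_alt top_conn bottom_conn binary_message
instance (top_conn : List Int) (bottom_conn : List Int) (binary_message : List Int) (out : String) : Decidable (Spec_convolutional_code top_conn bottom_conn binary_message out) := by unfold Spec_convolutional_code; infer_instance

-- ===== CLAIM (what is proved, stated in full; the proofs are below) =====
def Claim_equal_convolutional_code : Prop := ∀ (top_conn : List Int) (bottom_conn : List Int) (binary_message : List Int), Dom_convolutional_code top_conn bottom_conn binary_message → Pre_convolutional_code top_conn bottom_conn binary_message → Spec_convolutional_code top_conn bottom_conn binary_message (convolutional_code top_conn bottom_conn binary_message)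

-- ===== LEMMAS AND PROOFS =====

-- A's register list after processing prefix msg: the last k = len(top_conn) processed bits,
-- newest first, zero-padded.
def pvRreg (msg : List Int) (k : Nat) : List Int := (msg.reverse ++ List.replicate k 0).take k

theorem pvRreg_length (msg : List Int) (k : Nat) : (pvRreg msg k).length = k := by
  simp [pvRreg]

theorem pvRreg_ne_nil (msg : List Int) (k : Nat) (hk : 0 < k) : pvRreg msg k ≠ [] := by
  intro h
  have := pvRreg_length msg k
  rw [h] at this
  simp at this
  omega

theorem pvRreg_step (msg : List Int) (x : Int) (k : Nat) (hk : 0 < k) :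
    x :: (pvRreg msg k).dropLast = pvRreg (msg ++ [x]) k := by
  obtain ⟨n, rfl⟩ : ∃ n, k = n + 1 := ⟨k - 1, by omega⟩
  have h1 : (List.take (n + 1) (msg.reverse ++ List.replicate (n + 1) (0 : Int))).dropLast
      = List.take n (msg.reverse ++ List.replicate (n + 1) (0 : Int)) := by
    rw [List.dropLast_eq_take, List.take_take, List.length_take]
    congr 1
    simp only [List.length_append, List.length_reverse, List.length_replicate]
    omega
  simp only [pvRreg, List.reverse_append, List.reverse_singleton, List.cons_append,
    List.take_succ_cons, List.nil_append]
  rw [h1]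

theorem pvRreg_getD (msg : List Int) (k : Nat) (j : Nat) (hj : j < k) :
    (pvRreg msg k).getD j 0 =
      if j < msg.length then msg.getD (msg.length - 1 - j) 0 else 0 := by
  have hjl : j < (msg.reverse ++ List.replicate k 0).length := by simp; omega
  have hjt : j < (pvRreg msg k).length := by rw [pvRreg_length]; exact hj
  have h1 : (pvRreg msg k).getD j 0 = (msg.reverse ++ List.replicate k 0).getD j 0 := by
    rw [List.getD_eq_getElem _ _ hjt, List.getD_eq_getElem _ _ hjl]
    simp only [pvRreg]
    rw [List.getElem_take]
  rw [h1]
  by_cases hm : j < msg.length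
  · rw [List.getD_append _ _ _ _ (by simpa using hm), if_pos hm]
    rw [List.getD_eq_getElem _ _ (by simpa using hm), List.getD_eq_getElem _ _ (by omega)]
    rw [List.getElem_reverse]
  · rw [if_neg hm]
    rw [List.getD_eq_getElem _ _ hjl]
    rw [List.getElem_append_right (by simpa using hm)]
    simp

-- A's combined inner fold computed componentwise.
theorem pvInner_split (l : List (Int × Int × Int)) (t0 b0 : Int) :
    l.foldl (fun (p : Int × Int) trip =>
        let p1 := if trip.2.1 ≠ 0 then (PySem.Int.bxor p.1 trip.1, p.2) else p
        if trip.2.2 ≠ 0 then (p1.1, PySem.Int.bxor p1.2 trip.1) else p1) (t0, b0)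
      = (l.foldl (fun a trip => if trip.2.1 ≠ 0 then PySem.Int.bxor a trip.1 else a) t0,
         l.foldl (fun a trip => if trip.2.2 ≠ 0 then PySem.Int.bxor a trip.1 else a) b0) := by
  induction l generalizing t0 b0 with
  | nil => rfl
  | cons h t ih =>
    simp only [List.foldl_cons]
    rw [← ih]
    congr 1
    split_ifs <;> rfl

-- the zip of the registers with the two masks, as a map over indices
theorem pvZip3_eq (regs top bottom : List Int) :
    regs.zip (top.zip bottom)
      = (List.range (min regs.length (min top.length bottom.length))).map
          (fun j => (regs.getD j 0, top.getD j 0, bottom.getD j 0)) := by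
  apply List.ext_getElem
  · simp
  · intro i h1 h2
    simp only [List.length_zip] at h1
    have hi1 : i < regs.length := by omega
    have hi2 : i < top.length := by omega
    have hi3 : i < bottom.length := by omega
    simp [List.getElem_zip, hi1, hi2, hi3]

-- the full coded pair of B at message index i
def pvPair (top bottom msg : List Int) (i : Nat) : String :=
  PySem.Int.toStr (pvTapFold ((List.range (min top.length bottom.length)).filter (fun j => top.getD j 0 ≠ 0)) msg i) ++
  PySem.Int.toStr (pvTapFold ((List.range (min top.length bottom.length)).filter (fun j => bottom.getD j 0 ≠ 0)) msg i)

theorem pvAlt_eq (top bottom msg : List Int) :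
    convolutional_code_alt top bottom msg
      = PySem.Str.join "" ((List.range msg.length).map (pvPair top bottom msg)) := rfl

theorem pvJoinNil (l : List (List Char)) : PySem.Chars.join [] l = l.flatten := by
  induction l with
  | nil => rfl
  | cons a l ih =>
    cases l with
    | nil => simp [PySem.Chars.join, List.intercalate]
    | cons b t =>
      simp only [PySem.Chars.join, List.intercalate, List.intersperse] at *
      simp_all

theorem pvJoin_snoc (l : List String) (s : String) :
    PySem.Str.join "" (l ++ [s]) = PySem.Str.join "" l ++ s := by
  apply String.toList_inj.mp
  simp [PySem.Str.toList_join, pvJoinNil, String.toList_append]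

theorem pvTapFold_snoc (taps : List Nat) (p : List Int) (x : Int) (i : Nat) (hi : i < p.length) :
    pvTapFold taps (p ++ [x]) i = pvTapFold taps p i := by
  unfold pvTapFold
  apply PySem.List.foldl_congr_mem
  intro acc j _
  by_cases h : j ≤ i
  · rw [if_pos h, if_pos h, List.getD_append _ _ _ _ (by omega)]
  · rw [if_neg h, if_neg h]

theorem pvPair_snoc (top bottom p : List Int) (x : Int) (i : Nat) (hi : i < p.length) :
    pvPair top bottom (p ++ [x]) i = pvPair top bottom p i := by
  unfold pvPair
  rw [pvTapFold_snoc _ _ _ _ hi, pvTapFold_snoc _ _ _ _ hi]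

-- A's inner fold over the freshly shifted registers equals B's backward-indexing pair.
theorem pvInner_eq (top bottom M : List Int) (i : Nat) (hM : M.length = i + 1) :
    ((pvRreg M top.length).zip (top.zip bottom)).foldl
        (fun (p : Int × Int) trip =>
          let p1 := if trip.2.1 ≠ 0 then (PySem.Int.bxor p.1 trip.1, p.2) else p
          if trip.2.2 ≠ 0 then (p1.1, PySem.Int.bxor p1.2 trip.1) else p1) (0, 0)
      = (pvTapFold ((List.range (min top.length bottom.length)).filter (fun j => top.getD j 0 ≠ 0)) M i,
         pvTapFold ((List.range (min top.length bottom.length)).filter (fun j => bottom.getD j 0 ≠ 0)) M i) := by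
  rw [pvInner_split, pvZip3_eq]
  have hmin : min (pvRreg M top.length).length (min top.length bottom.length)
      = min top.length bottom.length := by
    rw [pvRreg_length]; omega
  rw [hmin]
  unfold pvTapFold
  rw [← PySem.List.foldl_ite_eq_foldl_filter (fun j => top.getD j 0 ≠ 0)
        (fun a j => if j ≤ i then PySem.Int.bxor a (M.getD (i - j) 0) else a)]
  rw [← PySem.List.foldl_ite_eq_foldl_filter (fun j => bottom.getD j 0 ≠ 0)
        (fun a j => if j ≤ i then PySem.Int.bxor a (M.getD (i - j) 0) else a)]
  have key : ∀ (j : Nat), j < min top.length bottom.length →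
      (pvRreg M top.length).getD j 0 = if j ≤ i then M.getD (i - j) 0 else 0 := by
    intro j hj
    rw [pvRreg_getD M top.length j (by omega), hM]
    by_cases h : j ≤ i
    · rw [if_pos (by omega : j < i + 1), if_pos h]
      congr 1
    · rw [if_neg (by omega : ¬ j < i + 1), if_neg h]
  simp only [List.foldl_map]
  congr 1
  · apply PySem.List.foldl_congr_mem
    intro acc j hj
    simp only [List.mem_range] at hj
    rw [key j hj]
    split_ifs <;> simp [PySem.Int.bxor_zero]
  · apply PySem.List.foldl_congr_mem
    intro acc j hj
    simp only [List.mem_range] at hj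
    rw [key j hj]
    split_ifs <;> simp [PySem.Int.bxor_zero]

-- the loop invariant of A: accumulated string = B's output on the processed prefix,
-- registers = pvRreg of the processed prefix
theorem pvLoop (top bottom : List Int) (htop : top ≠ []) (msg : List Int) :
    msg.foldl (fun (st : String × List Int) bit =>
      let registers :=
        match PySem.List.pop? st.2 with
        | some pr => PySem.List.insert pr.2 0 bit
        | none => st.2
      let tb := (registers.zip (top.zip bottom)).foldl
        (fun (p : Int × Int) trip =>
          let p1 := if trip.2.1 ≠ 0 then (PySem.Int.bxor p.1 trip.1, p.2) else p
          if trip.2.2 ≠ 0 then (p1.1, PySem.Int.bxor p1.2 trip.1) else p1)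
        (0, 0)
      (st.1 ++ (PySem.Int.toStr tb.1 ++ PySem.Int.toStr tb.2), registers))
      ("", List.replicate top.length 0)
    = (convolutional_code_alt top bottom msg, pvRreg msg top.length) := by
  have hk : 0 < top.length := List.length_pos_of_ne_nil htop
  induction msg using List.reverseRecOn with
  | nil =>
    simp only [List.foldl_nil]
    refine Prod.ext rfl ?_
    simp [pvRreg, List.take_replicate]
  | append_singleton p x ih =>
    rw [List.foldl_append, ih, List.foldl_cons, List.foldl_nil]
    have hne := pvRreg_ne_nil p top.length hk
    have hpop : PySem.List.pop? (pvRreg p top.length)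
        = some ((pvRreg p top.length).getLast hne, (pvRreg p top.length).dropLast) := by
      conv_lhs => rw [← List.dropLast_append_getLast hne]
      exact PySem.List.pop?_last _ _
    simp only [hpop, PySem.List.insert_zero]
    rw [pvRreg_step p x top.length hk]
    rw [pvInner_eq top bottom (p ++ [x]) p.length (by simp)]
    refine Prod.ext ?_ rfl
    simp only []
    rw [pvAlt_eq, pvAlt_eq]
    have hrange : List.range (p ++ [x]).length = List.range p.length ++ [p.length] := by
      simp [List.range_succ]
    rw [hrange, List.map_append, List.map_cons, List.map_nil, pvJoin_snoc]
    congr 2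
    apply List.map_congr_left
    intro i hi
    exact (pvPair_snoc top bottom p x i (List.mem_range.mp hi)).symm

-- ===== VERDICT (by name: the statement is the Claim_ definition above) =====
theorem convolutional_code_spec : Claim_equal_convolutional_code := by
  intro top_conn bottom_conn binary_message _ hpre
  unfold Spec_convolutional_code
  rcases hpre with h | h
  · subst h
    rfl
  · unfold convolutional_code
    rw [pvLoop top_conn bottom_conn h binary_message]
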